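-- pv_equiv track=rewrite | github.com/mitsuhiko/aoc25 | generators/gen_day12.py | polyomino_to_string
-- ===== SOURCE A (Python) =====
-- def polyomino_to_string(cells):
--     """Convert a polyomino to a string representation.
--
--     Args:
--         cells: Set of (x, y) coordinates
--
--     Returns:
--         Multi-line string with '#' for cells and '.' for empty spaces
--     """
--     if not cells:
--         return ""
--
--     max_x = max(x for x, y in cells)
--     max_y = max(y for x, y in cells)
--
--     lines = []
--     for y in range(max_y + 1):
--         line = ""
--         for x in range(max_x + 1):
--             line += "#" if (x, y) in cells else "."
--         lines.append(line)
--
--     return "\n".join(lines)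
-- ===== SOURCE B (Python) =====
-- def polyomino_to_string(cells):
--     """Convert a polyomino to a string representation (scatter onto a grid)."""
--     if not cells:
--         return ""
--
--     max_x = max(x for x, y in cells)
--     max_y = max(y for x, y in cells)
--
--     grid = [['.'] * (max_x + 1) for _ in range(max_y + 1)]
--     for x, y in cells:
--         if x >= 0 and y >= 0:
--             grid[y][x] = '#'
--
--     return "\n".join("".join(row) for row in grid)
-- ===== Notes on version B (the rewrite author's own statement) =====
-- stated objective: faster
-- what changed: Instead of scanning every grid position and testing membership in the cell set, B allocates a '.'-filled grid once and writes '#' only at the occupied cells (skipping negative coordinates, which A's scan never visits), then joins the rows.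
import Mathlib
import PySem

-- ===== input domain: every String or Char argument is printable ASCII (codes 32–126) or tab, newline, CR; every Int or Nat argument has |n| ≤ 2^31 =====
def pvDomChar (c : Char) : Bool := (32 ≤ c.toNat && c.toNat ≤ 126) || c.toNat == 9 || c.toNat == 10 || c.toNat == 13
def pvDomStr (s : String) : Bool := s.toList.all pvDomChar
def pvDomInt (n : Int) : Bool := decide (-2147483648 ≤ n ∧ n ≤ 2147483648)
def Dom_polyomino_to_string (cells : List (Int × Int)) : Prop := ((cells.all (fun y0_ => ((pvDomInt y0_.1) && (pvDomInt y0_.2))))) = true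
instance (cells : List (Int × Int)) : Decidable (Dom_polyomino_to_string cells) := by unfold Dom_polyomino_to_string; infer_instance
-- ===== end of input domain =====

-- B writes '#' once per occupied cell onto a pre-filled grid instead of testing every
-- grid position for membership in the cell set (objective: faster).

-- ===== PORT A =====
def polyomino_to_string (cells : List (Int × Int)) : String :=
  if cells = [] then ""
  else
    match PySem.List.max? (cells.map (fun p => p.1)) (fun v => v),
          PySem.List.max? (cells.map (fun p => p.2)) (fun v => v) with
    | some max_x, some max_y =>
        let lines : List (List Char) :=
          (PySem.List.pyRange 0 (max_y + 1) 1).foldl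
            (fun lines y =>
              let line : List Char :=
                (PySem.List.pyRange 0 (max_x + 1) 1).foldl
                  (fun line x => line ++ (if (x, y) ∈ cells then ['#'] else ['.'])) []
              lines ++ [line]) []
        String.ofList (PySem.Chars.join ['\n'] lines)
    | _, _ => ""  -- unreachable: cells ≠ [] gives some/some

-- ===== PORT B =====
-- loop body of B's scatter loop: write '#' at (x, y) unless a coordinate is negative
def pvScatter (g : List (List Char)) (p : Int × Int) : List (List Char) :=
  if 0 ≤ p.1 ∧ 0 ≤ p.2 then g.modify p.2.toNat (fun row => row.set p.1.toNat '#') else g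

def polyomino_to_string_alt (cells : List (Int × Int)) : String :=
  if cells = [] then ""
  else
    match PySem.List.max? (cells.map (fun p => p.1)) (fun v => v) with
    | none => ""  -- unreachable: cells ≠ [] gives some
    | some max_x =>
      match PySem.List.max? (cells.map (fun p => p.2)) (fun v => v) with
      | none => ""  -- unreachable: cells ≠ [] gives some
      | some max_y =>
        let grid : List (List Char) :=
          List.replicate (max_y + 1).toNat (List.replicate (max_x + 1).toNat '.')
        let grid := cells.foldl pvScatter grid
        String.ofList (PySem.Chars.join ['\n'] grid)

-- ===== PRECONDITION & SPEC =====
def Spec_polyomino_to_string (cells : List (Int × Int)) (out : String) : Prop := out = polyomino_to_string_alt cells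
instance (cells : List (Int × Int)) (out : String) : Decidable (Spec_polyomino_to_string cells out) := by unfold Spec_polyomino_to_string; infer_instance

-- ===== CLAIM (what is proved, stated in full; the proofs are below) =====
def Claim_equal_polyomino_to_string : Prop := ∀ (cells : List (Int × Int)), Dom_polyomino_to_string cells → Spec_polyomino_to_string cells (polyomino_to_string cells)

-- ===== LEMMAS AND PROOFS =====

-- the row at height j that both renderings produce
def pvRow (cells : List (Int × Int)) (cols : Nat) (j : Int) : List Char :=
  (List.range cols).map (fun i => if (Int.ofNat i, j) ∈ cells then '#' else '.')

-- element (j, i) of a grid, through Option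
def pvGGet (g : List (List Char)) (j i : Nat) : Option Char := g[j]?.bind (fun r => r[i]?)

lemma pvScatter_gget (g : List (List Char)) (c : Int × Int) (j i : Nat) :
    pvGGet (pvScatter g c) j i =
      if c = ((i : Int), (j : Int)) then (pvGGet g j i).map (fun _ => '#') else pvGGet g j i := by
  obtain ⟨x, y⟩ := c
  unfold pvGGet pvScatter
  by_cases hg : 0 ≤ x ∧ 0 ≤ y
  · rw [if_pos hg, List.getElem?_modify]
    cases hr : g[j]? with
    | none => split <;> simp
    | some r =>
      simp only [Option.map_eq_map, Option.map_some, Option.bind_some]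
      by_cases hj : y.toNat = j
      · by_cases hi : x.toNat = i
        · have hc : ((x, y) : Int × Int) = ((i : Int), (j : Int)) := by
            simp only [Prod.mk.injEq]; omega
          rw [if_pos hc, if_pos hj, ← hi]
          by_cases hlen : x.toNat < r.length
          · rw [List.getElem?_set_self hlen, List.getElem?_eq_getElem hlen]; rfl
          · rw [List.getElem?_eq_none (Nat.le_of_not_lt hlen),
                List.getElem?_eq_none (Nat.le_of_not_lt (by simpa using hlen))]
            rfl
        · have hc : ((x, y) : Int × Int) ≠ ((i : Int), (j : Int)) := by
            intro hE; rw [Prod.mk.injEq] at hE; omega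
          rw [if_neg hc, if_pos hj, List.getElem?_set_ne hi]
      · have hc : ((x, y) : Int × Int) ≠ ((i : Int), (j : Int)) := by
          intro hE; rw [Prod.mk.injEq] at hE; omega
        rw [if_neg hc, if_neg hj]
  · have hc : ((x, y) : Int × Int) ≠ ((i : Int), (j : Int)) := by
      intro hE; rw [Prod.mk.injEq] at hE; omega
    rw [if_neg hg, if_neg hc]

lemma pvScatter_foldl_gget (cs : List (Int × Int)) (g : List (List Char)) (j i : Nat) :
    pvGGet (cs.foldl pvScatter g) j i =
      if ((i : Int), (j : Int)) ∈ cs then (pvGGet g j i).map (fun _ => '#') else pvGGet g j i := by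
  induction cs generalizing g with
  | nil => simp
  | cons c cs ih =>
    simp only [List.foldl_cons, ih, pvScatter_gget, List.mem_cons]
    by_cases hc : c = ((i : Int), (j : Int))
    · by_cases hm : ((i : Int), (j : Int)) ∈ cs <;>
        simp [hc, hm, Option.map_map, Function.comp_def]
    · by_cases hm : ((i : Int), (j : Int)) ∈ cs <;>
        simp [hc, hm, Ne.symm hc]

lemma pvScatter_length (g : List (List Char)) (c : Int × Int) :
    (pvScatter g c).length = g.length := by
  unfold pvScatter; split <;> simp [List.length_modify]

lemma pvScatter_foldl_length (cs : List (Int × Int)) (g : List (List Char)) :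
    (cs.foldl pvScatter g).length = g.length := by
  induction cs generalizing g with
  | nil => rfl
  | cons c cs ih => simp [List.foldl_cons, ih, pvScatter_length]

lemma pvGGet_replicate (rows cols j i : Nat) :
    pvGGet (List.replicate rows (List.replicate cols '.')) j i =
      if j < rows ∧ i < cols then some '.' else none := by
  simp only [pvGGet, List.getElem?_replicate]
  by_cases hj : j < rows <;> by_cases hi : i < cols <;> simp [hj, hi]

-- B's final grid, row by row
lemma pvScatter_grid_eq (cells : List (Int × Int)) (rows cols : Nat) :
    cells.foldl pvScatter (List.replicate rows (List.replicate cols '.')) =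
      (List.range rows).map (fun j => pvRow cells cols (Int.ofNat j)) := by
  have hlen : (cells.foldl pvScatter (List.replicate rows (List.replicate cols '.'))).length = rows := by
    simp [pvScatter_foldl_length]
  apply List.ext_getElem (by simp [hlen])
  intro j h₁ h₂
  rw [List.getElem_map, List.getElem_range]
  apply List.ext_getElem?
  intro i
  have hrow : ((cells.foldl pvScatter (List.replicate rows (List.replicate cols '.')))[j])[i]? =
      pvGGet (cells.foldl pvScatter (List.replicate rows (List.replicate cols '.'))) j i := by
    simp [pvGGet, List.getElem?_eq_getElem h₁]
  have hj : j < rows := by omega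
  rw [hrow, pvScatter_foldl_gget, pvGGet_replicate]
  by_cases hi : i < cols
  · by_cases hm : ((i : Int), (j : Int)) ∈ cells <;>
      simp [pvRow, hm, hj, hi]
  · by_cases hm : ((i : Int), (j : Int)) ∈ cells <;>
      simp [pvRow, hm, hj, hi]

-- A's inner loop builds exactly pvRow
lemma pvA_line_eq (cells : List (Int × Int)) (mx y : Int) :
    (PySem.List.pyRange 0 (mx + 1) 1).foldl
        (fun line x => line ++ (if (x, y) ∈ cells then ['#'] else ['.'])) [] =
      pvRow cells (mx + 1).toNat y := by
  have h : ∀ (l : List Char) (x : Int),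
      l ++ (if (x, y) ∈ cells then ['#'] else ['.']) =
        l ++ [if (x, y) ∈ cells then '#' else '.'] := by
    intro l x; by_cases hm : (x, y) ∈ cells <;> simp [hm]
  simp only [h]
  rw [PySem.List.foldl_append_singleton_eq_map, PySem.List.pyRange_one, List.map_map,
    List.nil_append]
  unfold pvRow
  simp only [sub_zero]
  apply List.map_congr_left
  intro k _
  simp [Int.ofNat_eq_natCast]

-- A's outer loop builds the list of pvRow's
lemma pvA_lines_eq (cells : List (Int × Int)) (mx my : Int) :
    (PySem.List.pyRange 0 (my + 1) 1).foldl
        (fun lines y =>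
          lines ++ [(PySem.List.pyRange 0 (mx + 1) 1).foldl
            (fun line x => line ++ (if (x, y) ∈ cells then ['#'] else ['.'])) []]) [] =
      (List.range (my + 1).toNat).map (fun j => pvRow cells (mx + 1).toNat (Int.ofNat j)) := by
  rw [PySem.List.foldl_append_singleton_eq_map, PySem.List.pyRange_one 0 (my + 1),
    List.map_map, List.nil_append]
  simp only [sub_zero]
  apply List.map_congr_left
  intro j _
  simp only [Function.comp_apply, zero_add, Int.ofNat_eq_natCast]
  exact pvA_line_eq cells mx (j : Int)

-- ===== VERDICT (by name: the statement is the Claim_ definition above) =====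
theorem polyomino_to_string_spec : Claim_equal_polyomino_to_string := by
  intro cells _
  unfold Spec_polyomino_to_string polyomino_to_string polyomino_to_string_alt
  by_cases hnil : cells = []
  · simp [hnil]
  · simp only [hnil, if_false]
    cases hmx : PySem.List.max? (cells.map (fun p => p.1)) (fun v => v) with
    | none =>
      exfalso
      rw [PySem.List.max?_eq_none_iff] at hmx
      simp [hnil] at hmx
    | some mx =>
      cases hmy : PySem.List.max? (cells.map (fun p => p.2)) (fun v => v) with
      | none =>
        exfalso
        rw [PySem.List.max?_eq_none_iff] at hmy
        simp [hnil] at hmy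
      | some my =>
        simp only
        congr 1
        rw [pvA_lines_eq cells mx my, pvScatter_grid_eq cells (my + 1).toNat (mx + 1).toNat]
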